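-- pv_equiv track=rewrite | github.com/chointer/CodingProblems | 프로그래머스/2/76502. 괄호 회전하기/괄호 회전하기.py | solution
-- ===== SOURCE A (Python) =====
-- def iscorrect(s):
--     stack = []
--     st_set = ['(', '{', '[']
--     #en_set = [')', '}', ']']
--     d = {'(':')', '{':'}', '[':']'}
--     count = 0
--
--     for c in s:
--         if c in st_set:
--             stack.append(c)
--         elif not stack:
--             return 0
--         elif c == d[stack[-1]]: # stack이 존재하고, en_set일 때, stack을 제거 가능한 경우
--             stack.pop()
--             if not stack:
--                 count += 1
--         else:
--             return 0
--
--     return count if not stack else 0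
--
-- def solution(s):
--     ss = s + s
--     slen = len(s)
--     for i in range(slen):
--         answer = iscorrect(ss[i: i + slen])
--         if answer > 0:
--             break
--     return answer
-- ===== SOURCE B (Python) =====
-- def solution(s):
--     # validity by repeated cancellation of adjacent matching pairs (no stack);
--     # group count by a depth counter over the first valid rotation
--     n = len(s)
--     # no rotation can be valid unless each bracket kind is count-matched (rotation-invariant)
--     if s.count('(') != s.count(')') or s.count('{') != s.count('}') or s.count('[') != s.count(']'):
--         return 0
--     for k in range(n):
--         t = s[k:] + s[:k]
--         u = t
--         while True:
--             v = u.replace('()', '').replace('{}', '').replace('[]', '')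
--             if v == u:
--                 break
--             u = v
--         if u == '':
--             depth = 0
--             groups = 0
--             for c in t:
--                 depth += 1 if c in '({[' else -1
--                 if depth == 0:
--                     groups += 1
--             return groups
--     return 0
-- ===== Notes on version B (the rewrite author's own statement) =====
-- stated objective: alternative
-- what changed: A validates each rotation with a stack matcher that counts stack-empty events inline; B uses no stack at all: after a rotation-invariant bracket-count precheck, it decides validity by repeatedly deleting adjacent matched bracket pairs with str.replace until a fixpoint (valid iff the string cancels to empty) and only then counts top-level groups with a plain depth counter over the rotation.
import Mathlib
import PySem

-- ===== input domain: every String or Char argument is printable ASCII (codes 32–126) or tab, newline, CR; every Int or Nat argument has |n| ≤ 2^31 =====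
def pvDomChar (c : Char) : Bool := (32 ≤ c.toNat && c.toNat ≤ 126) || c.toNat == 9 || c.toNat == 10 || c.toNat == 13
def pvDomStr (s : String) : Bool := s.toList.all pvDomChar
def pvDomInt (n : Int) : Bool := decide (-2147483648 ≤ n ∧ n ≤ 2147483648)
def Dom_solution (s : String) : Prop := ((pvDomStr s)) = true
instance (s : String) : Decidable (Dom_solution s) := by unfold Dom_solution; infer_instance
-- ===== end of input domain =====

-- B replaces A's stack matcher by a stack-free algorithm: validity is decided by repeatedly
-- cancelling adjacent matching pairs with str.replace until a fixpoint, and the group count of a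
-- valid rotation is read off by a depth counter (objective: alternative; not claimed faster).

-- ===== PORT A =====
def pvA_d : PySem.Dict Char Char := PySem.Dict.ofList [('(', ')'), ('{', '}'), ('[', ']')]

-- the `for c in s` loop of iscorrect; state = (stack, count)
def pvA_go : List Char → List Char → Int → Int
  | [], stack, count => if stack.isEmpty then count else 0
  | c :: rest, stack, count =>
    if c ∈ ['(', '{', '['] then
      pvA_go rest (stack ++ [c]) count
    else if stack.isEmpty then 0
    -- d[stack[-1]]: the stack only ever holds keys of d, so the KeyError branch is dead;
    -- ported with getD (the default is never read)
    else if c = PySem.Dict.getD pvA_d (PySem.List.pyGetD stack (-1) ' ') ' ' then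
      pvA_go rest stack.dropLast (if stack.dropLast.isEmpty then count + 1 else count)
    else 0

def pvA_iscorrect (s : List Char) : Int := pvA_go s [] 0

-- the `for i in range(slen)` loop of solution, threading `answer`
def pvA_loop (ss : List Char) (slen : Nat) : List Int → Int → Int
  | [], answer => answer
  | i :: rest, _answer =>
    let a := pvA_iscorrect (PySem.List.slice ss (some i) (some (i + (slen : Int))))
    if a > 0 then a else pvA_loop ss slen rest a

-- initial answer 0 is only returned when the range is empty (s = ""), where Python A
-- raises UnboundLocalError (unbound `answer`); that input is excluded by Pre_solution
def solution (s : String) : Int :=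
  pvA_loop (s.toList ++ s.toList) s.toList.length
    (PySem.List.pyRange 0 (s.toList.length : Int) 1) 0

-- ===== PORT B =====
-- the count precheck: no rotation can be valid unless each bracket kind is count-matched
def pvB_mismatch (l : List Char) : Bool :=
  PySem.Chars.count l ['('] != PySem.Chars.count l [')'] ||
  PySem.Chars.count l ['{'] != PySem.Chars.count l ['}'] ||
  PySem.Chars.count l ['['] != PySem.Chars.count l [']']

-- one `while True` iteration: u.replace('()','').replace('{}','').replace('[]','')
def pvB_reduceStep (u : List Char) : List Char :=
  PySem.Chars.replace (PySem.Chars.replace (PySem.Chars.replace u ['(', ')'] []) ['{', '}'] []) ['[', ']'] []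

-- the `while True` cancellation loop; fuel = |u|+1 is a totality guard only: each
-- non-final iteration strictly shrinks u, so the 0 branch is never reached from solution_alt
def pvB_reduce : Nat → List Char → List Char
  | 0, u => u
  | f + 1, u => if pvB_reduceStep u = u then u else pvB_reduce f (pvB_reduceStep u)

-- the depth-counter pass `for c in t`
def pvB_count : List Char → Int → Int → Int
  | [], _, count => count
  | c :: rest, depth, count =>
    let depth' := depth + (if c ∈ ['(', '{', '['] then 1 else -1)
    pvB_count rest depth' (if depth' = 0 then count + 1 else count)

-- the `for k in range(n)` loop; t = s[k:] + s[:k]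
def pvB_loop (l : List Char) : List Int → Int
  | [] => 0
  | i :: rest =>
    if pvB_reduce ((PySem.List.slice l (some i) none ++ PySem.List.slice l none (some i)).length + 1)
        (PySem.List.slice l (some i) none ++ PySem.List.slice l none (some i)) = [] then
      pvB_count (PySem.List.slice l (some i) none ++ PySem.List.slice l none (some i)) 0 0
    else pvB_loop l rest

def solution_alt (s : String) : Int :=
  if pvB_mismatch s.toList then 0
  else pvB_loop s.toList (PySem.List.pyRange 0 (s.toList.length : Int) 1)

-- ===== PRECONDITION & SPEC =====
-- On the empty string Python A raises UnboundLocalError (`answer` is never assigned); excluded.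
def Pre_solution (s : String) : Prop := s ≠ ""
instance (s : String) : Decidable (Pre_solution s) := by unfold Pre_solution; infer_instance
def pvWitness_solution : String := "()"

def Spec_solution (s : String) (out : Int) : Prop := out = solution_alt s
instance (s : String) (out : Int) : Decidable (Spec_solution s out) := by unfold Spec_solution; infer_instance

-- ===== CLAIM (what is proved, stated in full; the proofs are below) =====
def Claim_equal_solution : Prop := ∀ (s : String), Dom_solution s → Pre_solution s → Spec_solution s (solution s)

-- ===== LEMMAS AND PROOFS =====

-- proof-side abstraction of A's stack machine: one step, and its run returning the final stack
def pvStep (c : Char) (st : List Char) : Option (List Char) :=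
  if c ∈ ['(', '{', '['] then some (st ++ [c])
  else if st.isEmpty then none
  else if c = PySem.Dict.getD pvA_d (PySem.List.pyGetD st (-1) ' ') ' ' then some st.dropLast
  else none

def pvRun : List Char → List Char → Option (List Char)
  | [], st => some st
  | c :: v, st =>
    match pvStep c st with
    | none => none
    | some st' => pvRun v st'

-- A's interleaved pass = run the machine; if it ends with an empty stack, the count is the
-- depth-counter count started at the current stack height
lemma pvA_go_eq (cs : List Char) : ∀ (stack : List Char) (count : Int),
    pvA_go cs stack count =
      (match pvRun cs stack with
       | none => 0
       | some st' => if st'.isEmpty then pvB_count cs (stack.length : Int) count else 0) := by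
  induction cs with
  | nil =>
    intro stack count
    by_cases h : stack.isEmpty <;> simp [pvA_go, pvRun, pvB_count, h]
  | cons c rest ih =>
    intro stack count
    by_cases hop : c ∈ ['(', '{', '[']
    · have hA : pvA_go (c :: rest) stack count = pvA_go rest (stack ++ [c]) count := by
        simp only [pvA_go]; rw [if_pos hop]
      have hstep : pvStep c stack = some (stack ++ [c]) := by simp [pvStep, hop]
      have hR : pvRun (c :: rest) stack = pvRun rest (stack ++ [c]) := by
        simp only [pvRun, hstep]
      have hC : pvB_count (c :: rest) (stack.length : Int) count
          = pvB_count rest (((stack ++ [c]).length : Int)) count := by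
        simp only [pvB_count]
        rw [if_pos hop, if_neg (by omega)]
        congr 1
        push_cast [List.length_append, List.length_cons, List.length_nil]
        ring
      rw [hA, ih, hR, hC]
    · rcases List.eq_nil_or_concat stack with hs | ⟨pre, t0, hs⟩
      · subst hs
        have hstep : pvStep c [] = none := by simp [pvStep, hop]
        have hA : pvA_go (c :: rest) [] count = 0 := by
          simp only [pvA_go]; rw [if_neg hop]; simp
        rw [hA]
        simp only [pvRun, hstep]
      · subst hs
        rw [List.concat_eq_append]
        by_cases hc : c = PySem.Dict.getD pvA_d (PySem.List.pyGetD (pre ++ [t0]) (-1) ' ') ' '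
        · have hA : pvA_go (c :: rest) (pre ++ [t0]) count
              = pvA_go rest pre (if pre.isEmpty then count + 1 else count) := by
            simp only [pvA_go]
            rw [if_neg hop, if_neg (by simp), if_pos hc, List.dropLast_concat]
          have hstep : pvStep c (pre ++ [t0]) = some pre := by
            simp only [pvStep]
            rw [if_neg hop, if_neg (by simp), if_pos hc, List.dropLast_concat]
          have hR : pvRun (c :: rest) (pre ++ [t0]) = pvRun rest pre := by
            simp only [pvRun, hstep]
          have hC : pvB_count (c :: rest) (((pre ++ [t0]).length : Int)) count
              = pvB_count rest ((pre.length : Int)) (if pre.isEmpty then count + 1 else count) := by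
            simp only [pvB_count]
            rw [if_neg hop]
            have hd : ((pre ++ [t0]).length : Int) + (-1) = (pre.length : Int) := by
              push_cast [List.length_append, List.length_cons, List.length_nil]; ring
            rw [hd]
            congr 1
            by_cases hpre : pre = [] <;> simp [hpre]
          rw [hA, ih, hR, hC]
        · have hA : pvA_go (c :: rest) (pre ++ [t0]) count = 0 := by
            simp only [pvA_go]
            rw [if_neg hop, if_neg (by simp), if_neg hc]
          have hstep : pvStep c (pre ++ [t0]) = none := by
            simp only [pvStep]
            rw [if_neg hop, if_neg (by simp), if_neg hc]
          rw [hA]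
          simp only [pvRun, hstep]

-- ---- B's cancellation, via a structural model of replace(pat, '') for a 2-char pattern ----
def pvDel (a b : Char) : List Char → List Char
  | x :: y :: r => if x = a ∧ y = b then pvDel a b r else x :: pvDel a b (y :: r)
  | l => l

lemma pvDel_go (a b : Char) : ∀ (fuel : Nat) (l acc : List Char), l.length ≤ fuel →
    PySem.Chars.replace.go [a, b] [] fuel l acc = acc.reverse ++ pvDel a b l := by
  intro fuel
  induction fuel with
  | zero =>
    intro l acc h
    have hl : l = [] := by cases l <;> simp_all
    subst hl
    simp [PySem.Chars.replace.go, pvDel]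
  | succ f ih =>
    intro l acc h
    match l with
    | [] => simp [PySem.Chars.replace.go, pvDel]
    | c :: t =>
      simp only [PySem.Chars.replace.go]
      by_cases hp : (([a, b] : List Char).isPrefixOf (c :: t)) = true
      · rw [if_pos hp]
        cases t with
        | nil => simp [List.isPrefixOf] at hp
        | cons y r =>
          simp only [List.isPrefixOf, Bool.and_eq_true, beq_iff_eq] at hp
          obtain ⟨hac, hby, -⟩ := hp
          subst hac; subst hby
          have hlen : r.length ≤ f := by simp at h; omega
          rw [show List.drop ([a, b] : List Char).length (a :: b :: r) = r from rfl]
          rw [ih r _ hlen]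
          simp only [pvDel, and_self]
          simp
      · rw [if_neg hp]
        have hlen : t.length ≤ f := by simp at h; omega
        rw [ih t _ hlen]
        have : pvDel a b (c :: t) = c :: pvDel a b t := by
          cases t with
          | nil => rfl
          | cons y r =>
            have : ¬(c = a ∧ y = b) := by
              intro ⟨h1, h2⟩; subst h1; subst h2
              simp [List.isPrefixOf] at hp
            simp only [pvDel, if_neg this]
        rw [this]
        simp

lemma pvRep_eq (a b : Char) (u : List Char) :
    PySem.Chars.replace u [a, b] [] = pvDel a b u := by
  unfold PySem.Chars.replace
  rw [if_neg (by simp)]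
  rw [pvDel_go a b u.length u [] le_rfl]
  simp

lemma pvDel_length (a b : Char) : ∀ u : List Char, (pvDel a b u).length ≤ u.length := by
  intro u
  fun_induction pvDel a b u with
  | case1 x y r h ih => simp only [List.length_cons]; omega
  | case2 x y r h ih => simp only [List.length_cons] at ih ⊢; omega
  | case3 l h => exact le_rfl

lemma pvDel_eq_of_length (a b : Char) : ∀ u : List Char,
    (pvDel a b u).length = u.length → pvDel a b u = u := by
  intro u
  fun_induction pvDel a b u with
  | case1 x y r hxy ih =>
    intro h
    exfalso; have := pvDel_length a b r; simp only [List.length_cons] at h; omega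
  | case2 x y r hxy ih =>
    intro h
    simp only [List.length_cons] at h
    simp only [List.length_cons] at ih
    rw [ih (by omega)]
  | case3 l h => intro _; rfl

def pvNoAdj (a b : Char) : List Char → Bool
  | x :: y :: r => if x = a ∧ y = b then false else pvNoAdj a b (y :: r)
  | _ => true

lemma pvDel_fix_noAdj (a b : Char) : ∀ u : List Char, pvDel a b u = u → pvNoAdj a b u = true := by
  intro u
  fun_induction pvDel a b u with
  | case1 x y r hxy ih =>
    intro h
    exfalso
    have hlen := pvDel_length a b r
    have := congrArg List.length h
    simp only [List.length_cons] at this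
    omega
  | case2 x y r hxy ih =>
    intro h
    simp only [List.cons.injEq, true_and] at h
    simp only [pvNoAdj, if_neg hxy]
    exact ih h
  | case3 l hl =>
    intro _
    cases l with
    | nil => rfl
    | cons x t =>
      cases t with
      | nil => rfl
      | cons y r => exact (hl x y r rfl).elim

-- cancelling an adjacent matching pair does not change the machine's run
lemma pvRun_del (a b : Char) (hab : (a, b) ∈ [('(', ')'), ('{', '}'), ('[', ']')]) :
    ∀ (u st : List Char), pvRun (pvDel a b u) st = pvRun u st := by
  have key : a ∈ ['(', '{', '['] ∧ ¬(b ∈ ['(', '{', '[']) ∧ PySem.Dict.getD pvA_d a ' ' = b := by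
    fin_cases hab <;> exact ⟨by decide, by decide, by decide⟩
  obtain ⟨ha, hbno, hcl⟩ := key
  intro u
  fun_induction pvDel a b u with
  | case1 x y r hxy ih =>
    obtain ⟨hx, hy⟩ := hxy; subst hx; subst hy
    intro st
    have h1 : pvStep x st = some (st ++ [x]) := by simp [pvStep, ha]
    have h2 : pvStep y (st ++ [x]) = some st := by
      simp only [pvStep]
      rw [if_neg hbno, if_neg (by simp)]
      rw [PySem.List.pyGetD_neg_one_append_singleton]
      rw [if_pos hcl.symm, List.dropLast_concat]
    have hR : pvRun (x :: y :: r) st = pvRun r st := by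
      simp only [pvRun, h1, h2]
    rw [hR]; exact ih st
  | case2 x y r hxy ih =>
    intro st
    simp only [pvRun]
    cases hx : pvStep x st with
    | none => rfl
    | some st' => exact ih st'
  | case3 l hl => intro st; rfl

lemma pvRun_reduceStep (u st : List Char) : pvRun (pvB_reduceStep u) st = pvRun u st := by
  unfold pvB_reduceStep
  rw [pvRep_eq, pvRep_eq, pvRep_eq]
  rw [pvRun_del '[' ']' (by decide), pvRun_del '{' '}' (by decide), pvRun_del '(' ')' (by decide)]

lemma pvRun_reduce (f : Nat) : ∀ (u st : List Char), pvRun (pvB_reduce f u) st = pvRun u st := by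
  induction f with
  | zero => intro u st; rfl
  | succ f ih =>
    intro u st
    by_cases hfix : pvB_reduceStep u = u
    · rw [show pvB_reduce (f + 1) u = u from by simp [pvB_reduce, hfix]]
    · rw [show pvB_reduce (f + 1) u = pvB_reduce f (pvB_reduceStep u) from by
        simp [pvB_reduce, hfix]]
      rw [ih, pvRun_reduceStep]

lemma pvReduceStep_length (u : List Char) : (pvB_reduceStep u).length ≤ u.length := by
  unfold pvB_reduceStep
  rw [pvRep_eq, pvRep_eq, pvRep_eq]
  calc (pvDel '[' ']' (pvDel '{' '}' (pvDel '(' ')' u))).length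
      ≤ (pvDel '{' '}' (pvDel '(' ')' u)).length := pvDel_length _ _ _
    _ ≤ (pvDel '(' ')' u).length := pvDel_length _ _ _
    _ ≤ u.length := pvDel_length _ _ _

lemma pvReduceStep_eq_of_length (u : List Char)
    (h : (pvB_reduceStep u).length = u.length) : pvB_reduceStep u = u := by
  unfold pvB_reduceStep at h ⊢
  rw [pvRep_eq, pvRep_eq, pvRep_eq] at h ⊢
  have L1 := pvDel_length '(' ')' u
  have L2 := pvDel_length '{' '}' (pvDel '(' ')' u)
  have L3 := pvDel_length '[' ']' (pvDel '{' '}' (pvDel '(' ')' u))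
  have e1 : pvDel '(' ')' u = u := pvDel_eq_of_length _ _ _ (by omega)
  rw [e1] at h ⊢
  have L2' := pvDel_length '{' '}' u
  have L3' := pvDel_length '[' ']' (pvDel '{' '}' u)
  have e2 : pvDel '{' '}' u = u := pvDel_eq_of_length _ _ _ (by omega)
  rw [e2] at h ⊢
  exact pvDel_eq_of_length _ _ _ h

lemma pvReduceStep_fix_parts (u : List Char) (h : pvB_reduceStep u = u) :
    pvDel '(' ')' u = u ∧ pvDel '{' '}' u = u ∧ pvDel '[' ']' u = u := by
  unfold pvB_reduceStep at h
  rw [pvRep_eq, pvRep_eq, pvRep_eq] at h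
  have L0 := congrArg List.length h
  have L1 := pvDel_length '(' ')' u
  have L2 := pvDel_length '{' '}' (pvDel '(' ')' u)
  have L3 := pvDel_length '[' ']' (pvDel '{' '}' (pvDel '(' ')' u))
  have e1 : pvDel '(' ')' u = u := pvDel_eq_of_length _ _ _ (by omega)
  rw [e1] at h L2 L3 L0
  have e2 : pvDel '{' '}' u = u := pvDel_eq_of_length _ _ _ (by omega)
  rw [e2] at h
  exact ⟨e1, e2, h⟩

lemma pvReduce_fix (f : Nat) : ∀ u : List Char, u.length < f →
    pvB_reduceStep (pvB_reduce f u) = pvB_reduce f u := by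
  induction f with
  | zero => intro u h; omega
  | succ f ih =>
    intro u h
    by_cases hfix : pvB_reduceStep u = u
    · rw [show pvB_reduce (f + 1) u = u from by simp [pvB_reduce, hfix]]
      exact hfix
    · rw [show pvB_reduce (f + 1) u = pvB_reduce f (pvB_reduceStep u) from by
        simp [pvB_reduce, hfix]]
      apply ih
      have hle := pvReduceStep_length u
      have hlt : (pvB_reduceStep u).length < u.length := by
        rcases lt_or_eq_of_le hle with h' | h'
        · exact h'
        · exact absurd (pvReduceStep_eq_of_length u h') hfix
      omega

lemma pvNoAdj_tail (a b c : Char) (v : List Char) (h : pvNoAdj a b (c :: v) = true) :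
    pvNoAdj a b v = true := by
  cases v with
  | nil => rfl
  | cons y r =>
    by_cases hcy : c = a ∧ y = b
    · simp only [pvNoAdj, if_pos hcy] at h
      exact absurd h (by simp)
    · simp only [pvNoAdj, if_neg hcy] at h
      exact h

-- a string with no adjacent matching pair makes the machine only push (or die): it never pops
lemma pvRun_noAdj : ∀ (u st : List Char),
    pvNoAdj '(' ')' u = true → pvNoAdj '{' '}' u = true → pvNoAdj '[' ']' u = true →
    (∀ c, u.head? = some c →
      st = [] ∨ c ≠ PySem.Dict.getD pvA_d (PySem.List.pyGetD st (-1) ' ') ' ') →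
    pvRun u st = none ∨ pvRun u st = some (st ++ u) := by
  intro u
  induction u with
  | nil => intro st _ _ _ _; right; simp [pvRun]
  | cons c v ih =>
    intro st h1 h2 h3 hok
    by_cases hop : c ∈ ['(', '{', '[']
    · have hstep : pvStep c st = some (st ++ [c]) := by simp [pvStep, hop]
      have hR : pvRun (c :: v) st = pvRun v (st ++ [c]) := by simp only [pvRun, hstep]
      have hok' : ∀ d, v.head? = some d →
          (st ++ [c]) = [] ∨ d ≠ PySem.Dict.getD pvA_d (PySem.List.pyGetD (st ++ [c]) (-1) ' ') ' ' := by
        intro d hd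
        right
        rw [PySem.List.pyGetD_neg_one_append_singleton]
        cases v with
        | nil => simp at hd
        | cons y r =>
          obtain rfl : d = y := by simpa using hd.symm
          fin_cases hop
          · rw [show PySem.Dict.getD pvA_d '(' ' ' = ')' from by decide]
            by_cases hy : d = ')'
            · exfalso; rw [show pvNoAdj '(' ')' ('(' :: d :: r) = false from by
                simp [pvNoAdj, hy]] at h1; exact absurd h1 (by simp)
            · exact hy
          · rw [show PySem.Dict.getD pvA_d '{' ' ' = '}' from by decide]
            by_cases hy : d = '}'
            · exfalso; rw [show pvNoAdj '{' '}' ('{' :: d :: r) = false from by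
                simp [pvNoAdj, hy]] at h2; exact absurd h2 (by simp)
            · exact hy
          · rw [show PySem.Dict.getD pvA_d '[' ' ' = ']' from by decide]
            by_cases hy : d = ']'
            · exfalso; rw [show pvNoAdj '[' ']' ('[' :: d :: r) = false from by
                simp [pvNoAdj, hy]] at h3; exact absurd h3 (by simp)
            · exact hy
      rcases ih (st ++ [c]) (pvNoAdj_tail _ _ _ _ h1) (pvNoAdj_tail _ _ _ _ h2)
          (pvNoAdj_tail _ _ _ _ h3) hok' with hn | hs
      · left; rw [hR]; exact hn
      · right; rw [hR, hs]; simp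
    · by_cases hemp : st.isEmpty = true
      · left
        have hstep : pvStep c st = none := by simp [pvStep, hop, hemp]
        simp only [pvRun, hstep]
      · rcases hok c rfl with hst | hne
        · exfalso; rw [hst] at hemp; exact hemp (by simp)
        · left
          have hstep : pvStep c st = none := by
            simp only [pvStep]
            rw [if_neg hop, if_neg hemp, if_neg hne]
          simp only [pvRun, hstep]

-- B's cancellation loop reaches [] exactly when A's machine accepts
lemma pvReduce_empty_iff (t : List Char) :
    pvB_reduce (t.length + 1) t = [] ↔ pvRun t [] = some [] := by
  constructor
  · intro h
    have h2 := pvRun_reduce (t.length + 1) t []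
    rw [h] at h2
    exact h2.symm
  · intro h
    have hfix := pvReduce_fix (t.length + 1) t (by omega)
    obtain ⟨e1, e2, e3⟩ := pvReduceStep_fix_parts _ hfix
    have hrun : pvRun (pvB_reduce (t.length + 1) t) [] = some [] := by
      rw [pvRun_reduce]; exact h
    rcases pvRun_noAdj (pvB_reduce (t.length + 1) t) []
        (pvDel_fix_noAdj _ _ _ e1) (pvDel_fix_noAdj _ _ _ e2) (pvDel_fix_noAdj _ _ _ e3)
        (fun c _ => Or.inl rfl) with hn | hs
    · rw [hrun] at hn; cases hn
    · rw [hrun] at hs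
      simpa using hs.symm

lemma pvB_count_pos : ∀ (t st : List Char) (k : Int), t ≠ [] → pvRun t st = some [] →
    k < pvB_count t (st.length : Int) k := by
  intro t
  induction t with
  | nil => intro st k h _; exact absurd rfl h
  | cons c v ih =>
    intro st k _ hrun
    by_cases hop : c ∈ ['(', '{', '[']
    · have hstep : pvStep c st = some (st ++ [c]) := by simp [pvStep, hop]
      rw [show pvRun (c :: v) st = pvRun v (st ++ [c]) from by simp only [pvRun, hstep]] at hrun
      have hv : v ≠ [] := by
        intro h; subst h; simp [pvRun] at hrun
      have hres := ih (st ++ [c]) k hv hrun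
      simp only [pvB_count]
      rw [if_pos hop, if_neg (by omega)]
      have hcast : (((st ++ [c]).length : Int)) = (st.length : Int) + 1 := by
        push_cast [List.length_append, List.length_cons, List.length_nil]; ring
      rw [hcast] at hres
      exact hres
    · rcases List.eq_nil_or_concat st with hs | ⟨pre, t0, hs⟩
      · subst hs
        exfalso
        have hstep : pvStep c [] = none := by simp [pvStep, hop]
        simp only [pvRun, hstep] at hrun
        simp at hrun
      · subst hs
        rw [List.concat_eq_append] at hrun ⊢
        by_cases hc : c = PySem.Dict.getD pvA_d (PySem.List.pyGetD (pre ++ [t0]) (-1) ' ') ' '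
        · have hstep : pvStep c (pre ++ [t0]) = some pre := by
            simp only [pvStep]
            rw [if_neg hop, if_neg (by simp), if_pos hc, List.dropLast_concat]
          rw [show pvRun (c :: v) (pre ++ [t0]) = pvRun v pre from by
            simp only [pvRun, hstep]] at hrun
          simp only [pvB_count]
          rw [if_neg hop]
          have hd : ((pre ++ [t0]).length : Int) + (-1) = (pre.length : Int) := by
            push_cast [List.length_append, List.length_cons, List.length_nil]; ring
          rw [hd]
          cases v with
          | nil =>
            have hpre : pre = [] := by simpa [pvRun] using hrun
            subst hpre
            simp [pvB_count]
          | cons y r =>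
            have h2 := ih pre (if (pre.length : Int) = 0 then k + 1 else k) (by simp) hrun
            have h3 : k ≤ (if (pre.length : Int) = 0 then k + 1 else k) := by
              split_ifs <;> omega
            exact lt_of_le_of_lt h3 h2
        · exfalso
          have hstep : pvStep c (pre ++ [t0]) = none := by
            simp only [pvStep]
            rw [if_neg hop, if_neg (by simp), if_neg hc]
          simp only [pvRun, hstep] at hrun
          simp at hrun

-- ---- the count precheck: cancellation preserves per-pair count differences ----
lemma pvCount_go (c : Char) : ∀ (fuel : Nat) (l : List Char) (acc : Nat), l.length ≤ fuel →
    PySem.Chars.count.go [c] fuel l acc = acc + l.count c := by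
  intro fuel
  induction fuel with
  | zero =>
    intro l acc h
    have hl : l = [] := by cases l <;> simp_all
    subst hl
    simp [PySem.Chars.count.go]
  | succ f ih =>
    intro l acc h
    match l with
    | [] => simp [PySem.Chars.count.go]
    | x :: t =>
      simp only [PySem.Chars.count.go]
      have hlen : t.length ≤ f := by simp at h; omega
      by_cases hx : c = x
      · rw [if_pos (by simp [List.isPrefixOf, hx])]
        rw [show List.drop ([c] : List Char).length (x :: t) = t from rfl]
        rw [ih t _ hlen]
        subst hx
        simp
        omega
      · have hpre : (([c] : List Char).isPrefixOf (x :: t)) = false := by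
          simp [List.isPrefixOf]
          exact hx
        rw [hpre, if_neg (by simp)]
        rw [ih t _ hlen]
        have hx' : ¬ x = c := fun hh => hx hh.symm
        simp [hx']

lemma pvCount_singleton (l : List Char) (c : Char) :
    PySem.Chars.count l [c] = l.count c := by
  unfold PySem.Chars.count
  rw [if_neg (by simp)]
  rw [pvCount_go c l.length l 0 le_rfl]
  omega

lemma pvDel_count_diff (a b : Char) (hab : a ≠ b) (u : List Char) :
    ((pvDel a b u).count a : Int) - ((pvDel a b u).count b : Int)
      = (u.count a : Int) - (u.count b : Int) := by
  fun_induction pvDel a b u with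
  | case1 x y r hxy ih =>
    obtain ⟨hx, hy⟩ := hxy; subst hx; subst hy
    simp only [List.count_cons, beq_iff_eq, if_neg hab, if_neg (Ne.symm hab)]
    push_cast
    omega
  | case2 x y r hxy ih =>
    simp only [List.count_cons, beq_iff_eq] at ih ⊢
    push_cast at ih ⊢
    omega
  | case3 l hl => rfl

lemma pvDel_count_other (a b c : Char) (hca : c ≠ a) (hcb : c ≠ b) (u : List Char) :
    (pvDel a b u).count c = u.count c := by
  fun_induction pvDel a b u with
  | case1 x y r hxy ih =>
    obtain ⟨hx, hy⟩ := hxy; subst hx; subst hy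
    simp only [List.count_cons, beq_iff_eq, if_neg (Ne.symm hca), if_neg (Ne.symm hcb)]
    omega
  | case2 x y r hxy ih =>
    simp only [List.count_cons, beq_iff_eq] at ih ⊢
    omega
  | case3 l hl => rfl

-- count difference of each pair through one reduce step
lemma pvReduceStep_counts (u : List Char) :
    (((pvB_reduceStep u).count '(' : Int) - ((pvB_reduceStep u).count ')' : Int)
        = ((u.count '(' : Int) - (u.count ')' : Int))) ∧
    (((pvB_reduceStep u).count '{' : Int) - ((pvB_reduceStep u).count '}' : Int)
        = ((u.count '{' : Int) - (u.count '}' : Int))) ∧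
    (((pvB_reduceStep u).count '[' : Int) - ((pvB_reduceStep u).count ']' : Int)
        = ((u.count '[' : Int) - (u.count ']' : Int))) := by
  unfold pvB_reduceStep
  rw [pvRep_eq, pvRep_eq, pvRep_eq]
  refine ⟨?_, ?_, ?_⟩
  · rw [pvDel_count_other '[' ']' '(' (by decide) (by decide),
        pvDel_count_other '[' ']' ')' (by decide) (by decide),
        pvDel_count_other '{' '}' '(' (by decide) (by decide),
        pvDel_count_other '{' '}' ')' (by decide) (by decide),
        pvDel_count_diff '(' ')' (by decide)]
  · rw [pvDel_count_other '[' ']' '{' (by decide) (by decide),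
        pvDel_count_other '[' ']' '}' (by decide) (by decide),
        pvDel_count_diff '{' '}' (by decide),
        pvDel_count_other '(' ')' '{' (by decide) (by decide),
        pvDel_count_other '(' ')' '}' (by decide) (by decide)]
  · rw [pvDel_count_diff '[' ']' (by decide),
        pvDel_count_other '{' '}' '[' (by decide) (by decide),
        pvDel_count_other '{' '}' ']' (by decide) (by decide),
        pvDel_count_other '(' ')' '[' (by decide) (by decide),
        pvDel_count_other '(' ')' ']' (by decide) (by decide)]

lemma pvReduce_counts (f : Nat) : ∀ u : List Char,
    (((pvB_reduce f u).count '(' : Int) - ((pvB_reduce f u).count ')' : Int)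
        = ((u.count '(' : Int) - (u.count ')' : Int))) ∧
    (((pvB_reduce f u).count '{' : Int) - ((pvB_reduce f u).count '}' : Int)
        = ((u.count '{' : Int) - (u.count '}' : Int))) ∧
    (((pvB_reduce f u).count '[' : Int) - ((pvB_reduce f u).count ']' : Int)
        = ((u.count '[' : Int) - (u.count ']' : Int))) := by
  induction f with
  | zero => intro u; exact ⟨rfl, rfl, rfl⟩
  | succ f ih =>
    intro u
    by_cases hfix : pvB_reduceStep u = u
    · rw [show pvB_reduce (f + 1) u = u from by simp [pvB_reduce, hfix]]
      exact ⟨rfl, rfl, rfl⟩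
    · rw [show pvB_reduce (f + 1) u = pvB_reduce f (pvB_reduceStep u) from by
        simp [pvB_reduce, hfix]]
      obtain ⟨i1, i2, i3⟩ := ih (pvB_reduceStep u)
      obtain ⟨s1, s2, s3⟩ := pvReduceStep_counts u
      exact ⟨by rw [i1, s1], by rw [i2, s2], by rw [i3, s3]⟩

-- an accepted string is count-matched on every bracket kind
lemma pvValid_counts (t : List Char) (h : pvRun t [] = some []) :
    t.count '(' = t.count ')' ∧ t.count '{' = t.count '}' ∧ t.count '[' = t.count ']' := by
  have hred : pvB_reduce (t.length + 1) t = [] := (pvReduce_empty_iff t).2 h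
  obtain ⟨c1, c2, c3⟩ := pvReduce_counts (t.length + 1) t
  rw [hred] at c1 c2 c3
  simp at c1 c2 c3
  exact ⟨by omega, by omega, by omega⟩

-- rotating a string does not change character counts
lemma pvCount_rot (l : List Char) (k : Nat) (c : Char) :
    (l.drop k ++ l.take k).count c = l.count c := by
  rw [List.count_append, Nat.add_comm, ← List.count_append, List.take_append_drop]

-- if every rotation scores 0, A's loop returns its threaded 0
lemma pvA_loop_zero (ss : List Char) (slen : Nat) : ∀ is : List Int,
    (∀ i ∈ is, pvA_iscorrect (PySem.List.slice ss (some i) (some (i + (slen : Int)))) = 0) →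
    pvA_loop ss slen is 0 = 0 := by
  intro is
  induction is with
  | nil => intro _; rfl
  | cons i rest ih =>
    intro h
    show (let a := pvA_iscorrect (PySem.List.slice ss (some i) (some (i + (slen : Int))))
          if a > 0 then a else pvA_loop ss slen rest a)
        = 0
    rw [h i (by simp)]
    simp only [gt_iff_lt, lt_self_iff_false, if_false]
    exact ih (fun j hj => h j (by simp [hj]))

-- A's iscorrect = B's per-rotation computation
lemma pvA_iscorrect_eq (t : List Char) :
    pvA_iscorrect t =
      (if pvB_reduce (t.length + 1) t = [] then pvB_count t 0 0 else 0) := by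
  unfold pvA_iscorrect
  rw [pvA_go_eq]
  by_cases h : pvB_reduce (t.length + 1) t = []
  · rw [if_pos h, (pvReduce_empty_iff t).1 h]
    simp
  · rw [if_neg h]
    have hne : pvRun t [] ≠ some [] := fun hh => h ((pvReduce_empty_iff t).2 hh)
    cases hrun : pvRun t [] with
    | none => rfl
    | some st' =>
      have hst : st' ≠ [] := fun he => hne (by rw [hrun, he])
      simp [hst]

-- (s+s)[i:i+len(s)] is the rotation s[i:] + s[:i]
lemma slice_rot (l : List Char) (k : Nat) (hk : k ≤ l.length) :
    PySem.List.slice (l ++ l) (some (k : Int)) (some ((k : Int) + (l.length : Int))) =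
      l.drop k ++ l.take k := by
  rw [PySem.List.slice_natCast_add]
  rw [List.drop_append_of_le_length hk]
  rw [List.take_append, List.take_of_length_le (by simp)]
  congr 1
  simp
  omega

-- the two rotation loops agree once no rotation so far was valid
lemma loops_eq (l : List Char) (hl : l ≠ []) : ∀ (is : List Int),
    (∀ i ∈ is, 0 ≤ i ∧ i ≤ (l.length : Int)) →
    pvA_loop (l ++ l) l.length is 0 = pvB_loop l is := by
  intro is
  induction is with
  | nil => intro _; rfl
  | cons i rest ih =>
    intro h
    obtain ⟨h0, h1⟩ := h i (by simp)
    have hk : i = ((i.toNat : Nat) : Int) := by omega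
    have hkl : i.toNat ≤ l.length := by omega
    have hA : PySem.List.slice (l ++ l) (some i) (some (i + (l.length : Int))) =
        l.drop i.toNat ++ l.take i.toNat := by
      rw [hk]; exact slice_rot l i.toNat hkl
    have hB : PySem.List.slice l (some i) none ++ PySem.List.slice l none (some i) =
        l.drop i.toNat ++ l.take i.toNat := by
      rw [PySem.List.slice_from l h0, PySem.List.slice_to l h0]
    have htne : l.drop i.toNat ++ l.take i.toNat ≠ [] := by
      intro hh
      apply hl
      have hlen := congrArg List.length hh
      simp only [List.length_append, List.length_drop, List.length_take,
        List.length_nil] at hlen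
      have hz : l.length = 0 := by omega
      exact List.length_eq_zero_iff.mp hz
    show (let a := pvA_iscorrect (PySem.List.slice (l ++ l) (some i) (some (i + (l.length : Int))))
          if a > 0 then a else pvA_loop (l ++ l) l.length rest a) =
        (if pvB_reduce ((PySem.List.slice l (some i) none ++ PySem.List.slice l none (some i)).length + 1)
            (PySem.List.slice l (some i) none ++ PySem.List.slice l none (some i)) = [] then
          pvB_count (PySem.List.slice l (some i) none ++ PySem.List.slice l none (some i)) 0 0
        else pvB_loop l rest)
    simp only [hA, hB, pvA_iscorrect_eq]
    by_cases hred : pvB_reduce ((l.drop i.toNat ++ l.take i.toNat).length + 1)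
        (l.drop i.toNat ++ l.take i.toNat) = []
    · rw [if_pos hred, if_pos hred]
      have hpos : (0 : Int) < pvB_count (l.drop i.toNat ++ l.take i.toNat) 0 0 := by
        have := pvB_count_pos (l.drop i.toNat ++ l.take i.toNat) [] 0 htne
          ((pvReduce_empty_iff _).1 hred)
        simpa using this
      rw [if_pos hpos]
    · rw [if_neg hred, if_neg hred]
      rw [if_neg (by omega)]
      exact ih (fun j hj => h j (by simp [hj]))

-- ===== VERDICT (by name: the statement is the Claim_ definition above) =====
theorem solution_spec : Claim_equal_solution := by
  intro s _ hp
  unfold Spec_solution solution solution_alt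
  by_cases hm : pvB_mismatch s.toList = true
  · rw [if_pos hm]
    apply pvA_loop_zero
    intro i hi
    have hb := (PySem.List.mem_pyRange_one).1 hi
    have hk : i = ((i.toNat : Nat) : Int) := by omega
    have hkl : i.toNat ≤ s.toList.length := by omega
    rw [hk, slice_rot s.toList i.toNat hkl, pvA_iscorrect_eq]
    rw [if_neg ?hred]
    case hred =>
      intro hred
      have hrun := (pvReduce_empty_iff _).1 hred
      obtain ⟨c1, c2, c3⟩ := pvValid_counts _ hrun
      rw [pvCount_rot, pvCount_rot] at c1 c2 c3
      rw [show pvB_mismatch s.toList = false from by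
        unfold pvB_mismatch
        rw [pvCount_singleton, pvCount_singleton, pvCount_singleton,
            pvCount_singleton, pvCount_singleton, pvCount_singleton]
        simp [c1, c2, c3]] at hm
      exact absurd hm (by simp)
  · rw [if_neg hm]
    refine loops_eq s.toList ?_ _ ?_
    · intro hnil
      apply hp
      exact String.toList_eq_nil_iff.mp hnil
    · intro i hi
      have := (PySem.List.mem_pyRange_one).1 hi
      omega
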